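-- pv_equiv track=rewrite | github.com/longluv1605/crocodl-benchmark | scantools/run_interpolate_rigs.py | select_next_instances
-- ===== SOURCE A (Python) =====
-- from typing import List, Dict
--
-- def select_next_instances(timestamps : Dict[str, List[int]], best_timestamps : Dict[str, int]):
--     """
--     Uses only the most recent of each image, and the most recent trajectory
--     before all selected images as the lower bound, and oldest trajectory after
--     all images as the upper bound.
--     Loosely based on: https://wiki.ros.org/message_filters/ApproximateTime
--     """
--     best_indices = [None] * len(timestamps)
--     for index_sensor, sensor_id in enumerate(timestamps):
--         if sensor_id == 'trajectory_lower':
--             assert (index_sensor == len(timestamps) - 2)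
--             for index_trajectory, timestamp_trajectory in reversed(list(enumerate(timestamps[sensor_id]))):
--                 lesser_than = True
--                 for sensor_id_other in timestamps:
--                     if (sensor_id_other not in {'trajectory_lower', 'trajectory_upper'}
--                         and not (timestamp_trajectory <=
--                             timestamps[sensor_id_other][-1])):
--                         lesser_than = False
--                 if lesser_than:
--                     best_indices[index_sensor] = index_trajectory
--                     break
--         elif sensor_id == 'trajectory_upper':
--             assert (index_sensor == len(timestamps) - 1)
--             for index_trajectory, timestamp_trajectory in enumerate(timestamps[sensor_id]):
--                 greater_than = True
--                 for sensor_id_other in timestamps: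
--                     if (sensor_id_other not in {'trajectory_lower', 'trajectory_upper'}
--                         and not (timestamp_trajectory >=
--                             timestamps[sensor_id_other][-1])):
--                         greater_than = False
--                 if greater_than:
--                     best_indices[index_sensor] = index_trajectory
--                     break
--         else:
--             best_indices[index_sensor] = len(timestamps[sensor_id]) - 1 # last element
--     valid_odom_found = (best_indices[-1] != None and best_indices[-2] != None)
--     if valid_odom_found:
--         return best_indices, valid_odom_found
--     else:
--         return None, valid_odom_found
-- ===== SOURCE B (Python) =====
-- TRAJ = ('trajectory_lower', 'trajectory_upper')
--
-- def select_next_instances(timestamps, best_timestamps):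
--     """Same selection as A, but the per-candidate rescan of every other sensor's
--     last timestamp is replaced by a min/max of those last timestamps computed once.
--     A's layout asserts (trajectory_lower second-to-last key, trajectory_upper last)
--     are kept."""
--     items = list(timestamps.items())
--     n = len(items)
--     keys = [k for k, _ in items]
--     if 'trajectory_lower' in timestamps:
--         assert keys.index('trajectory_lower') == n - 2
--     if 'trajectory_upper' in timestamps:
--         assert keys.index('trajectory_upper') == n - 1
--     lasts = [v[-1] for k, v in items if k not in TRAJ and v]
--     lo = min(lasts) if lasts else None
--     hi = max(lasts) if lasts else None
--     best = []
--     for k, v in items: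
--         if k == 'trajectory_lower':
--             best.append(next((j for j, t in reversed(list(enumerate(v)))
--                               if lo is None or t <= lo), None))
--         elif k == 'trajectory_upper':
--             best.append(next((j for j, t in enumerate(v)
--                               if hi is None or t >= hi), None))
--         else:
--             best.append(len(v) - 1)
--     if len(best) >= 2 and best[-1] is not None and best[-2] is not None:
--         return best, True
--     return None, False
-- ===== Notes on version B (the rewrite author's own statement) =====
-- stated objective: alternative
-- what changed: A rescans every other sensor's last timestamp for each candidate trajectory timestamp; B computes the min and max of the non-trajectory last timestamps once, compares each trajectory candidate against that single precomputed bound, and builds the result list by appending instead of writing into a preallocated None list (A's explicit layout asserts are kept).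
import Mathlib
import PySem

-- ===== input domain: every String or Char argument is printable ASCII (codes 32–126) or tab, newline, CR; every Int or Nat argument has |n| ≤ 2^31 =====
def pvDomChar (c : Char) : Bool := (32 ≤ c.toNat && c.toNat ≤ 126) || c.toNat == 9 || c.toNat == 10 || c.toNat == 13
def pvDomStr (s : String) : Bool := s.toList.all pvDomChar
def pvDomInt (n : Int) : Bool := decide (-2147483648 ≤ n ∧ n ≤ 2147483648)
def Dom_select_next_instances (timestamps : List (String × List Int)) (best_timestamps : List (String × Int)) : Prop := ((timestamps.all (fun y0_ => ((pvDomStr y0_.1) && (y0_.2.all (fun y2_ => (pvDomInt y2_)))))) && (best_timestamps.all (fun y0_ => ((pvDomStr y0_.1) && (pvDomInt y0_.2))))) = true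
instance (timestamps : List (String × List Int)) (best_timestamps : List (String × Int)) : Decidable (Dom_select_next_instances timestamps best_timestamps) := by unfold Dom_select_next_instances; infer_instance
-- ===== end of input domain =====

-- B replaces A's rescan of every other sensor's last timestamp per trajectory candidate by a
-- min/max of those last timestamps computed once (objective: alternative).
-- `best_timestamps` is unused by the Python A and so by B.

-- ===== PORT A =====
-- xs[-1]; total form, exact where Pre_ guarantees the list is nonempty
def pyLastD (l : List Int) : Int := PySem.List.pyGetD l (-1) 0

-- membership in the Python set literal {'trajectory_lower', 'trajectory_upper'}
def isTraj (k : String) : Bool := k == "trajectory_lower" || k == "trajectory_upper"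

-- the inner 'for sensor_id_other in timestamps: … lesser_than = False' loop
def aLesser (ts : List (String × List Int)) (t : Int) : Bool :=
  (ts.map Prod.fst).foldl (fun lesser k =>
    if !(isTraj k) && !(decide (t ≤ pyLastD ((PySem.Dict.mk ts).getD k []))) then false
    else lesser) true

-- the inner 'greater_than' loop
def aGreater (ts : List (String × List Int)) (t : Int) : Bool :=
  (ts.map Prod.fst).foldl (fun greater k =>
    if !(isTraj k) && !(decide (pyLastD ((PySem.Dict.mk ts).getD k []) ≤ t)) then false
    else greater) true

-- the body of the outer loop: the value written into best_indices[index_sensor]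
-- (the first candidate at which the scan breaks, else the initial None; Python's asserts are
-- excluded by Pre_ and not modelled)
def aRow (ts : List (String × List Int)) (k : String) : Option Int :=
  if k == "trajectory_lower" then
    (((PySem.List.enumerate ((PySem.Dict.mk ts).getD k []) 0).reverse).find?
        (fun p => aLesser ts p.2)).map Prod.fst
  else if k == "trajectory_upper" then
    ((PySem.List.enumerate ((PySem.Dict.mk ts).getD k []) 0).find?
        (fun p => aGreater ts p.2)).map Prod.fst
  else
    some (PySem.List.len ((PySem.Dict.mk ts).getD k []) - 1)

def select_next_instances (timestamps : List (String × List Int)) (best_timestamps : List (String × Int)) : Option (List (Option Int)) × Bool :=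
  let best_indices := (PySem.List.enumerate (timestamps.map Prod.fst) 0).foldl
      (fun bi p => PySem.List.pySetD bi p.1 (aRow timestamps p.2))
      (List.replicate timestamps.length none)
  let valid_odom_found := (PySem.List.pyGetD best_indices (-1) none).isSome
      && (PySem.List.pyGetD best_indices (-2) none).isSome
  if valid_odom_found then (some best_indices, valid_odom_found)
  else (none, valid_odom_found)

-- ===== PORT B =====
-- [v[-1] for k, v in items if k not in TRAJ and v]
def bLasts (ts : List (String × List Int)) : List Int :=
  (ts.filter (fun p => !(isTraj p.1) && !p.2.isEmpty)).map (fun p => pyLastD p.2)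

-- one entry of B's 'best' list, from the precomputed bounds lo/hi
def bRow (lo hi : Option Int) (p : String × List Int) : Option Int :=
  if p.1 == "trajectory_lower" then
    (((PySem.List.enumerate p.2 0).reverse).find?
        (fun q => lo.all (fun m => decide (q.2 ≤ m)))).map Prod.fst
  else if p.1 == "trajectory_upper" then
    ((PySem.List.enumerate p.2 0).find?
        (fun q => hi.all (fun m => decide (m ≤ q.2)))).map Prod.fst
  else
    some (PySem.List.len p.2 - 1)

def select_next_instances_alt (timestamps : List (String × List Int)) (best_timestamps : List (String × Int)) : Option (List (Option Int)) × Bool :=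
  let lasts := bLasts timestamps
  let lo := lasts.min?
  let hi := lasts.max?
  let best := timestamps.map (bRow lo hi)
  if decide (2 ≤ best.length) && (PySem.List.pyGetD best (-1) none).isSome
      && (PySem.List.pyGetD best (-2) none).isSome
  then (some best, true) else (none, false)

-- ===== PRECONDITION & SPEC =====
-- Pre_ excludes exactly (a) the inputs on which the Python A raises — AssertionError when
-- 'trajectory_lower'/'trajectory_upper' is not the second-to-last/last key, IndexError from
-- other_list[-1] when a trajectory scan runs while some non-trajectory list is empty, and
-- IndexError from best_indices[-1]/[-2] on dicts of length 0, or length 1 except the one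
-- returning shape [('trajectory_upper', [])] — and (b) duplicate keys, which a Python dict
-- cannot carry (the association list and the dict it denotes would disagree).
def Pre_select_next_instances (timestamps : List (String × List Int)) (best_timestamps : List (String × Int)) : Prop :=
  (timestamps.map Prod.fst).Nodup ∧
  1 ≤ timestamps.length ∧
  ("trajectory_lower" ∈ timestamps.map Prod.fst →
      (timestamps.map Prod.fst).idxOf "trajectory_lower" + 2 = timestamps.length) ∧
  ("trajectory_upper" ∈ timestamps.map Prod.fst →
      (timestamps.map Prod.fst).idxOf "trajectory_upper" + 1 = timestamps.length) ∧
  ((∃ p ∈ timestamps, isTraj p.1 = true ∧ p.2 ≠ []) →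
      ∀ p ∈ timestamps, isTraj p.1 = false → p.2 ≠ []) ∧
  (timestamps.length = 1 → timestamps = [("trajectory_upper", [])])

instance (timestamps : List (String × List Int)) (best_timestamps : List (String × Int)) : Decidable (Pre_select_next_instances timestamps best_timestamps) := by
  unfold Pre_select_next_instances; infer_instance

def pvWitness_select_next_instances : (List (String × List Int)) × (List (String × Int)) :=
  ([("cam", [3, 7]), ("trajectory_lower", [1, 5, 9]), ("trajectory_upper", [2, 8])], [])

def Spec_select_next_instances (timestamps : List (String × List Int)) (best_timestamps : List (String × Int)) (out : Option (List (Option Int)) × Bool) : Prop := out = select_next_instances_alt timestamps best_timestamps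
instance (timestamps : List (String × List Int)) (best_timestamps : List (String × Int)) (out : Option (List (Option Int)) × Bool) : Decidable (Spec_select_next_instances timestamps best_timestamps out) := by unfold Spec_select_next_instances; infer_instance

-- ===== CLAIM (what is proved, stated in full; the proofs are below) =====
def Claim_equal_select_next_instances : Prop := ∀ (timestamps : List (String × List Int)) (best_timestamps : List (String × Int)), Dom_select_next_instances timestamps best_timestamps → Pre_select_next_instances timestamps best_timestamps → Spec_select_next_instances timestamps best_timestamps (select_next_instances timestamps best_timestamps)

-- ===== LEMMAS AND PROOFS =====

-- find? only looks at members: predicates agreeing on the list find the same element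
theorem find?_congr_mem {α : Type} {p q : α → Bool} : ∀ {l : List α},
    (∀ a ∈ l, p a = q a) → l.find? p = l.find? q := by
  intro l
  induction l with
  | nil => intro _; rfl
  | cons x xs ih =>
    intro h
    simp only [List.find?_cons, h x (by simp)]
    cases q x with
    | true => rfl
    | false => exact ih (fun a ha => h a (by simp [ha]))

-- A's mutation loop 'for i, k in enumerate(keys): best[i] = f(k)' over an all-None list of
-- the right length builds keys.map f
theorem foldl_pySetD_enumerate {f : String → Option Int} : ∀ (ks : List String) (s : Nat)
    (acc : List (Option Int)), acc.length = s + ks.length →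
    (PySem.List.enumerate ks (s : Int)).foldl
        (fun bi p => PySem.List.pySetD bi p.1 (f p.2)) acc
      = acc.take s ++ ks.map f := by
  intro ks
  induction ks with
  | nil =>
    intro s acc h
    simp only [List.length_nil, Nat.add_zero] at h
    simp [PySem.List.enumerate_nil, List.take_of_length_le (le_of_eq h)]
  | cons k ks ih =>
    intro s acc h
    rw [PySem.List.enumerate_cons, List.foldl_cons]
    have hset : PySem.List.pySetD acc (s : Int) (f k) = acc.set s (f k) := by
      simp [PySem.List.pySetD_natCast]
    rw [hset]
    have hcast : ((s : Int) + 1) = ((s + 1 : Nat) : Int) := by push_cast; ring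
    rw [hcast, ih (s + 1) (acc.set s (f k))
      (by rw [List.length_set, h, List.length_cons]; omega)]
    have hs : s < acc.length := by rw [h, List.length_cons]; omega
    have hsplit : acc.set s (f k) = acc.take s ++ f k :: acc.drop (s + 1) := by
      rw [List.set_eq_take_append_cons_drop]; simp [hs]
    have hlen : (acc.take s).length = s := by rw [List.length_take]; omega
    rw [hsplit, List.take_append,
      List.take_of_length_le (by omega : (acc.take s).length ≤ s + 1), hlen]
    have h1 : s + 1 - s = 1 := by omega
    rw [h1]
    simp

-- under Nodup keys, looking the dict up at a key of a member pair returns that pair's value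
theorem dict_getD_mem {ts : List (String × List Int)} {p : String × List Int}
    (hnd : (ts.map Prod.fst).Nodup) (hp : p ∈ ts) :
    (PySem.Dict.mk ts).getD p.1 [] = p.2 :=
  PySem.Dict.getD_of_mem_items (PySem.Dict.mk ts) (by simpa using hp) (by simpa using hnd) []

-- A's inner flag loop is an 'all' over B's precomputed last-timestamp list
theorem aLesser_eq_all {ts : List (String × List Int)} (hnd : (ts.map Prod.fst).Nodup)
    (hne : ∀ p ∈ ts, isTraj p.1 = false → p.2 ≠ []) (t : Int) :
    aLesser ts t = (bLasts ts).all (fun x => decide (t ≤ x)) := by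
  unfold aLesser bLasts
  rw [PySem.List.foldl_if_false_eq, Bool.true_and, List.all_map, List.all_filter,
    List.any_map, Bool.eq_iff_iff, Bool.not_eq_true', List.any_eq_false, List.all_eq_true]
  constructor
  · intro h p hp
    have := h p hp
    simp only [Function.comp, dict_getD_mem hnd hp] at this
    cases hT : isTraj p.1 with
    | true => simp
    | false =>
      have hnil := hne p hp hT
      simp only [hT, Bool.not_false, Bool.true_and] at this
      have hle := (by simpa using this : _)
      simp [hle]
  · intro h p hp
    have := h p hp
    simp only [Function.comp, dict_getD_mem hnd hp]
    cases hT : isTraj p.1 with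
    | true => simp
    | false =>
      have hnil := hne p hp hT
      have hie : p.2.isEmpty = false := by simpa [List.isEmpty_iff] using hnil
      simp only [hT, hie, Bool.not_false, Bool.true_and, Bool.or_eq_true,
        Bool.not_eq_true'] at this
      rcases this with h' | h'
      · simp at h'
      · simpa using h'

theorem aGreater_eq_all {ts : List (String × List Int)} (hnd : (ts.map Prod.fst).Nodup)
    (hne : ∀ p ∈ ts, isTraj p.1 = false → p.2 ≠ []) (t : Int) :
    aGreater ts t = (bLasts ts).all (fun x => decide (x ≤ t)) := by
  unfold aGreater bLasts
  rw [PySem.List.foldl_if_false_eq, Bool.true_and, List.all_map, List.all_filter,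
    List.any_map, Bool.eq_iff_iff, Bool.not_eq_true', List.any_eq_false, List.all_eq_true]
  constructor
  · intro h p hp
    have := h p hp
    simp only [Function.comp, dict_getD_mem hnd hp] at this
    cases hT : isTraj p.1 with
    | true => simp
    | false =>
      have hnil := hne p hp hT
      simp only [hT, Bool.not_false, Bool.true_and] at this
      have hle := (by simpa using this : _)
      simp [hle]
  · intro h p hp
    have := h p hp
    simp only [Function.comp, dict_getD_mem hnd hp]
    cases hT : isTraj p.1 with
    | true => simp
    | false =>
      have hnil := hne p hp hT
      have hie : p.2.isEmpty = false := by simpa [List.isEmpty_iff] using hnil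
      simp only [hT, hie, Bool.not_false, Bool.true_and, Bool.or_eq_true,
        Bool.not_eq_true'] at this
      rcases this with h' | h'
      · simp at h'
      · simpa using h'

-- 'all (t ≤ ·)' over a list is 't ≤ its min?' (and dually for max?)
theorem all_le_eq_min? (l : List Int) (t : Int) :
    l.all (fun x => decide (t ≤ x)) = (l.min?).all (fun m => decide (t ≤ m)) := by
  cases hm : l.min? with
  | none =>
    have : l = [] := by
      cases l with
      | nil => rfl
      | cons x xs => simp [List.min?_cons] at hm
    simp [this]
  | some m =>
    simp only [Option.all_some]
    rw [Bool.eq_iff_iff]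
    simp only [List.all_eq_true, decide_eq_true_eq]
    exact (List.le_min?_iff hm).symm

theorem all_ge_eq_max? (l : List Int) (t : Int) :
    l.all (fun x => decide (x ≤ t)) = (l.max?).all (fun m => decide (m ≤ t)) := by
  cases hm : l.max? with
  | none =>
    have : l = [] := by
      cases l with
      | nil => rfl
      | cons x xs => simp [List.max?_cons] at hm
    simp [this]
  | some m =>
    simp only [Option.all_some]
    rw [Bool.eq_iff_iff]
    simp only [List.all_eq_true, decide_eq_true_eq]
    exact (List.max?_le_iff hm).symm

-- each row of A equals the corresponding row of B
theorem aRow_eq_bRow {ts : List (String × List Int)} {p : String × List Int}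
    (hnd : (ts.map Prod.fst).Nodup)
    (hne : (∃ q ∈ ts, isTraj q.1 = true ∧ q.2 ≠ []) →
        ∀ q ∈ ts, isTraj q.1 = false → q.2 ≠ [])
    (hp : p ∈ ts) :
    aRow ts p.1 = bRow (bLasts ts).min? (bLasts ts).max? p := by
  have hgd : (PySem.Dict.mk ts).getD p.1 [] = p.2 := dict_getD_mem hnd hp
  unfold aRow bRow
  rw [hgd]
  rcases eq_or_ne p.2 [] with hnil | hnil
  · rw [hnil]
    simp [PySem.List.enumerate_nil]
  · by_cases hl : (p.1 == "trajectory_lower") = true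
    · have hT : isTraj p.1 = true := by simp [isTraj, hl]
      have hne' := hne ⟨p, hp, hT, hnil⟩
      rw [if_pos hl, if_pos hl]
      congr 1
      apply find?_congr_mem
      intro q _
      rw [aLesser_eq_all hnd hne', all_le_eq_min?]
    · rw [if_neg hl, if_neg hl]
      by_cases hu : (p.1 == "trajectory_upper") = true
      · have hT : isTraj p.1 = true := by simp [isTraj, hu]
        have hne' := hne ⟨p, hp, hT, hnil⟩
        rw [if_pos hu, if_pos hu]
        congr 1
        apply find?_congr_mem
        intro q _
        rw [aGreater_eq_all hnd hne', all_ge_eq_max?]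
      · rw [if_neg hu, if_neg hu]

-- ===== VERDICT (by name: the statement is the Claim_ definition above) =====
theorem select_next_instances_spec : Claim_equal_select_next_instances := by
  intro ts bts hdom hpre
  obtain ⟨hnd, hlen1, hlow, hup, hne, hone⟩ := hpre
  unfold Spec_select_next_instances
  rcases (by omega : ts.length = 1 ∨ 2 ≤ ts.length) with h1 | h2
  · rw [hone h1]
    rfl
  · simp only [select_next_instances, select_next_instances_alt]
    have hbest : (PySem.List.enumerate (ts.map Prod.fst) 0).foldl
        (fun bi p => PySem.List.pySetD bi p.1 (aRow ts p.2))
        (List.replicate ts.length none)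
        = ts.map (bRow (bLasts ts).min? (bLasts ts).max?) := by
      have h0 : (0 : Int) = ((0 : Nat) : Int) := rfl
      rw [h0, foldl_pySetD_enumerate (ts.map Prod.fst) 0 _ (by simp)]
      rw [List.take_zero, List.nil_append, List.map_map]
      exact List.map_congr_left (fun p hp => aRow_eq_bRow hnd hne hp)
    rw [hbest]
    have hlenL : (ts.map (bRow (bLasts ts).min? (bLasts ts).max?)).length = ts.length :=
      List.length_map ..
    have h2' : 2 ≤ (ts.map (bRow (bLasts ts).min? (bLasts ts).max?)).length := by omega
    rw [decide_eq_true h2', Bool.true_and]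
    cases hv : (PySem.List.pyGetD (ts.map (bRow (bLasts ts).min? (bLasts ts).max?)) (-1) none).isSome
        && (PySem.List.pyGetD (ts.map (bRow (bLasts ts).min? (bLasts ts).max?)) (-2) none).isSome
    · simp
    · simp
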